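-- pv_equiv track=rewrite | github.com/dcross23/AoC2020 | Day20/p20.py | getBorders
-- ===== SOURCE A (Python) =====
-- def getBorders(tiles):
--     borders = {}
--     for tile in tiles:
--         borders[tile] = []
--
--         n = tiles[tile][0]
--         s = tiles[tile][-1]
--
--         e,w = [],[]
--         for row in tiles[tile]:
--             e.append(row[0])
--             w.append(row[-1])
--
--         e = ''.join(e)
--         w = ''.join(w)
--
--         borders[tile].append(n)
--         borders[tile].append(s)
--         borders[tile].append(e)
--         borders[tile].append(w)
--     return borders
-- ===== SOURCE B (Python) =====
-- def getBorders(tiles):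
--     def borders4(rows):
--         # one structural recursion over the rows: threads (first, last, e, w);
--         # e/w are built by string concatenation back-to-front, last row comes
--         # out of the recursion (no grid[-1] indexing, no join, no accumulators)
--         head = rows[0]
--         if len(rows) == 1:
--             return head, head, head[0], head[-1]
--         _, last, e, w = borders4(rows[1:])
--         return head, last, head[0] + e, head[-1] + w
--     return {tile: list(borders4(tiles[tile])) for tile in tiles}
-- ===== Notes on version B (the rewrite author's own statement) =====
-- stated objective: alternative
-- what changed: B replaces A's staged per-tile computation (index grid[0] and grid[-1], then a separate append loop over rows with ''.join for the two columns) by a single structural recursion over the rows that threads (first,last,e,w) and builds the column strings by concatenation, the last row being produced by the recursion rather than by indexing; Pre_ excludes duplicate tile ids (no Python dict has them) and empty grids/rows (A raises IndexError there).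
import Mathlib
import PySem

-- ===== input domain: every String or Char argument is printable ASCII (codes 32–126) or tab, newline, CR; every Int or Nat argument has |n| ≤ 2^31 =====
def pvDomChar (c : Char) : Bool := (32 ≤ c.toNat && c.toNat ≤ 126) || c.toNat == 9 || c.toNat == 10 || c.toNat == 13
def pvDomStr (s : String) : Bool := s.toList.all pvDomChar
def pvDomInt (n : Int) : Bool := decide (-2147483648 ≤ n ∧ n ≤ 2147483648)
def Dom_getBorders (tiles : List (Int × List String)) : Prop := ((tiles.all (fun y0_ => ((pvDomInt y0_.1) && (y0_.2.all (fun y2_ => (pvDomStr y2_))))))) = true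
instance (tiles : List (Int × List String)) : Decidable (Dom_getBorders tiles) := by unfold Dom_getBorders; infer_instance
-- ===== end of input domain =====

-- B replaces A's staged per-tile build (grid[0]/grid[-1] indexing plus an append loop with join
-- for the columns) by one structural recursion over the rows threading (first,last,e,w); objective: alternative.


-- ===== PORT A =====
-- per-tile body of A's loop: n = tiles[tile][0]; s = tiles[tile][-1]; e,w accumulated per row then joined.
-- ''.join of the one-character strings row[0] / row[-1] is modelled as String.ofList of the accumulated chars;
-- the .getD defaults only make the indexing total — Pre_ excludes the inputs where Python raises IndexError.
def borderOf (tiles : List (Int × List String)) (tile : Int) : List String :=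
  let grid := PySem.Dict.getD (PySem.Dict.mk tiles) tile []      -- tiles[tile]
  let n := PySem.List.pyGetD grid 0 ""
  let s := PySem.List.pyGetD grid (-1) ""
  let ew := grid.foldl
      (fun (ew : List Char × List Char) row =>
        (ew.1 ++ [(PySem.Str.pyGet? row 0).getD ' '],
         ew.2 ++ [(PySem.Str.pyGet? row (-1)).getD ' ']))
      (([] : List Char), ([] : List Char))
  let e := String.ofList ew.1      -- ''.join(e)
  let w := String.ofList ew.2      -- ''.join(w)
  [n] ++ [s] ++ [e] ++ [w]         -- borders[tile] = [] then the four appends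

def getBorders (tiles : List (Int × List String)) : List (Int × List String) :=
  (tiles.foldl
    (fun (borders : PySem.Dict Int (List String)) pr =>
      PySem.Dict.insert borders pr.1 (borderOf tiles pr.1))
    PySem.Dict.empty).items

-- ===== PORT B =====
-- Source B's borders4: recursion on the rows returning (first, last, e, w); the Python strings e, w
-- (built by one-character concatenation head[0] + e) are modelled on the List Char side, with
-- String.ofList applied once where Source B turns the tuple into the dict's list value.
-- The [] case is unreachable under Pre_ (Python raises IndexError on rows[0] there).
def borders4 : List String → String × String × List Char × List Char
  | [] => ("", "", [], [])
  | [head] => (head, head,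
      [(PySem.Str.pyGet? head 0).getD ' '], [(PySem.Str.pyGet? head (-1)).getD ' '])
  | head :: rest@(_ :: _) =>
      let r := borders4 rest
      (head, r.2.1,
       (PySem.Str.pyGet? head 0).getD ' ' :: r.2.2.1,
       (PySem.Str.pyGet? head (-1)).getD ' ' :: r.2.2.2)

def getBorders_alt (tiles : List (Int × List String)) : List (Int × List String) :=
  tiles.map (fun pr =>
    let r := borders4 pr.2
    (pr.1, [r.1, r.2.1, String.ofList r.2.2.1, String.ofList r.2.2.2]))

-- ===== PRECONDITION & SPEC =====
-- Pre_ excludes inputs where Python A raises IndexError (a tile whose grid is a zero-length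
-- list, via tiles[tile][0], or a grid containing a zero-length row, via row[0]) and
-- association lists with duplicate tile ids, which do not represent any Python dict.
def Pre_getBorders (tiles : List (Int × List String)) : Prop :=
  (tiles.map Prod.fst).Nodup ∧ ∀ p ∈ tiles, p.2 ≠ [] ∧ ∀ r ∈ p.2, r ≠ ""
instance (tiles : List (Int × List String)) : Decidable (Pre_getBorders tiles) := by unfold Pre_getBorders; infer_instance
def pvWitness_getBorders : (List (Int × List String)) := [(1, ["ab", "cd"]), (7, ["xyz", "pqr", "mno"])]

def Spec_getBorders (tiles : List (Int × List String)) (out : List (Int × List String)) : Prop := out = getBorders_alt tiles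
instance (tiles : List (Int × List String)) (out : List (Int × List String)) : Decidable (Spec_getBorders tiles out) := by unfold Spec_getBorders; infer_instance

-- ===== CLAIM (what is proved, stated in full; the proofs are below) =====
def Claim_equal_getBorders : Prop := ∀ (tiles : List (Int × List String)), Dom_getBorders tiles → Pre_getBorders tiles → Spec_getBorders tiles (getBorders tiles)

-- ===== LEMMAS AND PROOFS =====

-- B's recursion computes head, last and the two mapped columns, for nonempty rows
theorem borders4_eq (rows : List String) (h : rows ≠ []) :
    borders4 rows =
      (PySem.List.pyGetD rows 0 "",
       PySem.List.pyGetD rows (-1) "",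
       rows.map (fun row => (PySem.Str.pyGet? row 0).getD ' '),
       rows.map (fun row => (PySem.Str.pyGet? row (-1)).getD ' ')) := by
  induction rows with
  | nil => exact absurd rfl h
  | cons a rest ih =>
    cases rest with
    | nil =>
      rw [PySem.List.pyGetD_neg_one (xs := [a]) (d := "") (by simp)]
      simp [borders4, PySem.List.pyGetD_zero_cons]
    | cons b t =>
      simp only [borders4, ih (by simp)]
      have h1 : PySem.List.pyGetD (a :: b :: t) (-1) "" = (a :: b :: t).getLast (by simp) :=
        PySem.List.pyGetD_neg_one _ "" (by simp)
      have h2 : PySem.List.pyGetD (b :: t) (-1) "" = (b :: t).getLast (by simp) :=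
        PySem.List.pyGetD_neg_one _ "" (by simp)
      simp [PySem.List.pyGetD_zero_cons, h1, h2, List.getLast_cons]

-- on a tile actually present in a duplicate-free tiles, A's per-tile body computes B's four borders
theorem borderOf_eq (tiles : List (Int × List String)) (pr : Int × List String)
    (hmem : pr ∈ tiles) (hnd : (tiles.map Prod.fst).Nodup) :
    borderOf tiles pr.1 =
      [PySem.List.pyGetD pr.2 0 "",
       PySem.List.pyGetD pr.2 (-1) "",
       String.ofList (pr.2.map (fun row => (PySem.Str.pyGet? row 0).getD ' ')),
       String.ofList (pr.2.map (fun row => (PySem.Str.pyGet? row (-1)).getD ' '))] := by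
  have hgrid : PySem.Dict.getD (PySem.Dict.mk tiles) pr.1 [] = pr.2 := by
    apply PySem.Dict.getD_of_mem_items
    · exact hmem
    · simpa [PySem.Dict.keys] using hnd
  simp only [borderOf, hgrid]
  rw [PySem.List.foldl_prod_mk
      (f := fun acc row => acc ++ [(PySem.Str.pyGet? row 0).getD ' '])
      (g := fun acc row => acc ++ [(PySem.Str.pyGet? row (-1)).getD ' '])]
  rw [PySem.List.foldl_append_singleton_eq_map, PySem.List.foldl_append_singleton_eq_map]
  simp

-- ===== VERDICT (by name: the statement is the Claim_ definition above) =====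
theorem getBorders_spec : Claim_equal_getBorders := by
  intro tiles _ hpre
  unfold Spec_getBorders getBorders getBorders_alt
  rw [PySem.Dict.items_foldl_insert_fresh tiles Prod.fst
        (fun pr => borderOf tiles pr.1) PySem.Dict.empty
        (fun a _ => PySem.Dict.contains_empty a.1) hpre.1]
  simp only [PySem.Dict.empty, List.nil_append]
  refine List.map_congr_left (fun pr hmem => ?_)
  rw [borderOf_eq tiles pr hmem hpre.1, borders4_eq pr.2 ((hpre.2 pr hmem).1)]
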